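-- pv_equiv track=rewrite | github.com/abdulmajid18/ds-2023-python | 2025/arrays/easy/find_the_union.py | union_of_arrays
-- ===== SOURCE A (Python) =====
-- def union_of_arrays(a, b):
--     # Step 1: Create an empty set
--     result_set = set()
--
--     # Step 2: Add elements from both arrays to the set (duplicate elements will be ignored)
--     for num in a:
--         result_set.add(num)
--
--     for num in b:
--         result_set.add(num)
--
--     # Step 3: Convert the set to a list and sort it
--     result = list(result_set)
--     result.sort()
--
--     return result
-- ===== SOURCE B (Python) =====
-- def union_of_arrays(a, b):
--     sa = sorted(set(a))
--     sb = sorted(set(b))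
--     out = []
--     i = j = 0
--     while i < len(sa) and j < len(sb):
--         x, y = sa[i], sb[j]
--         if x < y:
--             out.append(x)
--             i += 1
--         elif y < x:
--             out.append(y)
--             j += 1
--         else:
--             out.append(x)
--             i += 1
--             j += 1
--     out.extend(sa[i:])
--     out.extend(sb[j:])
--     return out
-- ===== Notes on version B (the rewrite author's own statement) =====
-- stated objective: alternative
-- what changed: Instead of pooling both arrays into one set and sorting the combined list, B dedups and sorts each array separately and merges the two sorted unique lists with a two-pointer loop that advances both pointers on equal heads.
import Mathlib
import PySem

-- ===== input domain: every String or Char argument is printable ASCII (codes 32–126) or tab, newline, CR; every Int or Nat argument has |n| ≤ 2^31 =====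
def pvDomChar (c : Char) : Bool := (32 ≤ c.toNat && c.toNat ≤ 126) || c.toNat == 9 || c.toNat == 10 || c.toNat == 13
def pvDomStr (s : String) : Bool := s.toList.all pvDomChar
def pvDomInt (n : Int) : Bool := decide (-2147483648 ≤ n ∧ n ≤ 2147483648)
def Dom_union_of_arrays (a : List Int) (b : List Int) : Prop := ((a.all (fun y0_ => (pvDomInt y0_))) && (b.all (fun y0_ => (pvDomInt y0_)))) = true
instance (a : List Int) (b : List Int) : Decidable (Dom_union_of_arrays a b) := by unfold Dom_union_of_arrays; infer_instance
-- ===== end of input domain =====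

-- B replaces A's pool-everything-then-sort with per-array dedup+sort and a two-pointer
-- merge of the two sorted unique lists (a different algorithm of similar cost).

-- ===== PORT A =====
-- A: result_set = set(); add all of a, then all of b; list it and sort.
def union_of_arrays (a : List Int) (b : List Int) : List Int :=
  let resultSet : PySem.Set Int := PySem.Set.empty
  let resultSet := a.foldl (fun s num => PySem.Set.add s num) resultSet
  let resultSet := b.foldl (fun s num => PySem.Set.add s num) resultSet
  PySem.List.sorted resultSet (fun x => x) false

-- ===== PORT B =====
-- two-pointer merge of two lists (Source B's while loop + the two extends)
def pvMerge : List Int → List Int → List Int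
  | [], ys => ys
  | x :: xs, [] => x :: xs
  | x :: xs, y :: ys =>
    if x < y then x :: pvMerge xs (y :: ys)
    else if y < x then y :: pvMerge (x :: xs) ys
    else x :: pvMerge xs ys

def union_of_arrays_alt (a : List Int) (b : List Int) : List Int :=
  let sa := PySem.List.sorted (PySem.Set.ofList a) (fun x => x) false
  let sb := PySem.List.sorted (PySem.Set.ofList b) (fun x => x) false
  pvMerge sa sb

-- ===== PRECONDITION & SPEC =====
def Spec_union_of_arrays (a : List Int) (b : List Int) (out : List Int) : Prop := out = union_of_arrays_alt a b
instance (a : List Int) (b : List Int) (out : List Int) : Decidable (Spec_union_of_arrays a b out) := by unfold Spec_union_of_arrays; infer_instance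

-- ===== CLAIM (what is proved, stated in full; the proofs are below) =====
def Claim_equal_union_of_arrays : Prop := ∀ (a : List Int) (b : List Int), Dom_union_of_arrays a b → Spec_union_of_arrays a b (union_of_arrays a b)

-- ===== LEMMAS AND PROOFS =====

theorem mem_pvMerge (xs ys : List Int) (z : Int) :
    z ∈ pvMerge xs ys ↔ z ∈ xs ∨ z ∈ ys := by
  fun_induction pvMerge xs ys with
  | case1 ys => simp
  | case2 x xs => simp
  | case3 x xs y ys hxy ih =>
    simp only [List.mem_cons, ih]
    tauto
  | case4 x xs y ys hxy hyx ih =>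
    simp only [List.mem_cons, ih]
    tauto
  | case5 x xs y ys hxy hyx ih =>
    have hxyeq : x = y := le_antisymm (not_lt.mp hyx) (not_lt.mp hxy)
    simp only [List.mem_cons, ih]
    subst hxyeq; tauto

theorem pairwise_pvMerge (xs ys : List Int)
    (hx : xs.Pairwise (· < ·)) (hy : ys.Pairwise (· < ·)) :
    (pvMerge xs ys).Pairwise (· < ·) := by
  fun_induction pvMerge xs ys with
  | case1 ys => simpa [pvMerge] using hy
  | case2 x xs => simpa [pvMerge] using hx
  | case3 x xs y ys hxy ih =>
    rw [List.pairwise_cons] at hx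
    simp only [List.pairwise_cons]
    refine ⟨?_, ih hx.2 hy⟩
    intro z hz
    rcases (mem_pvMerge _ _ _).mp hz with h | h
    · exact hx.1 z h
    · rcases List.mem_cons.mp h with rfl | h
      · exact hxy
      · exact lt_trans hxy ((List.pairwise_cons.mp hy).1 z h)
  | case4 x xs y ys hxy hyx ih =>
    rw [List.pairwise_cons] at hy
    simp only [List.pairwise_cons]
    refine ⟨?_, ih hx hy.2⟩
    intro z hz
    rcases (mem_pvMerge _ _ _).mp hz with h | h
    · rcases List.mem_cons.mp h with rfl | h
      · exact hyx
      · exact lt_trans hyx ((List.pairwise_cons.mp hx).1 z h)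
    · exact hy.1 z h
  | case5 x xs y ys hxy hyx ih =>
    have hxyeq : x = y := le_antisymm (not_lt.mp hyx) (not_lt.mp hxy)
    rw [List.pairwise_cons] at hx
    rw [List.pairwise_cons] at hy
    simp only [List.pairwise_cons]
    refine ⟨?_, ih hx.2 hy.2⟩
    intro z hz
    rcases (mem_pvMerge _ _ _).mp hz with h | h
    · exact hx.1 z h
    · exact hxyeq ▸ hy.1 z h

theorem nodup_of_pairwise_lt (xs : List Int) (h : xs.Pairwise (· < ·)) : xs.Nodup :=
  h.imp (fun hlt => ne_of_lt hlt)

-- ===== VERDICT (by name: the statement is the Claim_ definition above) =====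
theorem union_of_arrays_spec : Claim_equal_union_of_arrays := by
  intro a b _hdom
  unfold Spec_union_of_arrays union_of_arrays union_of_arrays_alt
  have hs1 : a.foldl (fun s num => PySem.Set.add s num) PySem.Set.empty = PySem.Set.ofList a := rfl
  have hs2 : b.foldl (fun s num => PySem.Set.add s num) (PySem.Set.ofList a)
      = PySem.Set.update (PySem.Set.ofList a) b := rfl
  show PySem.List.sorted
      (List.foldl (fun s num => PySem.Set.add s num)
        (List.foldl (fun s num => PySem.Set.add s num) PySem.Set.empty a) b) (fun x => x) false
      = pvMerge (PySem.List.sorted (PySem.Set.ofList a) (fun x => x) false)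
          (PySem.List.sorted (PySem.Set.ofList b) (fun x => x) false)
  rw [hs1, hs2]
  have hpwa := PySem.List.sorted_ofList_pairwise_lt (xs := a)
  have hpwb := PySem.List.sorted_ofList_pairwise_lt (xs := b)
  have hpw : (pvMerge (PySem.List.sorted (PySem.Set.ofList a) (fun x => x) false)
      (PySem.List.sorted (PySem.Set.ofList b) (fun x => x) false)).Pairwise (· < ·) :=
    pairwise_pvMerge _ _ hpwa hpwb
  have hperm : (pvMerge (PySem.List.sorted (PySem.Set.ofList a) (fun x => x) false)
      (PySem.List.sorted (PySem.Set.ofList b) (fun x => x) false)).Perm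
      (PySem.Set.update (PySem.Set.ofList a) b) := by
    rw [List.perm_ext_iff_of_nodup (nodup_of_pairwise_lt _ hpw)
      (PySem.Set.nodup_update _ _ (PySem.Set.nodup_ofList a))]
    intro z
    rw [mem_pvMerge, PySem.List.mem_sorted, PySem.List.mem_sorted,
      PySem.Set.mem_ofList, PySem.Set.mem_ofList, PySem.Set.mem_update, PySem.Set.mem_ofList]
  exact PySem.List.sorted_eq_of_perm_of_pairwise_lt _ _ _ hperm hpw
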